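-- pv_equiv track=rewrite | github.com/seryrzu/centroFlye | scripts/sequence_graph/db_graph.py | partition_pseudounits
-- ===== SOURCE A (Python) =====
-- from collections import defaultdict, Counter
--
-- def partition_pseudounits(monostring):
--     pseudounits = []
--     i = 0
--     while i < len(monostring):
--         j = 0
--         monomer_cnt = Counter()
--         while i+j < len(monostring):
--             monomer = monostring[i+j]
--             monomer_cnt[monomer] += 1
--             if monomer_cnt[monomer] > 1:
--                 break
--             j += 1
--         pseudounit = (i, i + j - 1)
--         pseudounits.append(pseudounit)
--         i += j
--     return pseudounits
-- ===== SOURCE B (Python) =====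
-- def partition_pseudounits(monostring):
--     if not monostring:
--         return []
--     pseudounits = []
--     start = 0
--     seen = {monostring[0]}
--     for i in range(1, len(monostring)):
--         monomer = monostring[i]
--         if monomer in seen:
--             pseudounits.append((start, i - 1))
--             start = i
--             seen = {monomer}
--         else:
--             seen.add(monomer)
--     pseudounits.append((start, len(monostring) - 1))
--     return pseudounits
-- ===== Notes on version B (the rewrite author's own statement) =====
-- stated objective: faster
-- what changed: Replaced the nested while loops (restarting a fresh Counter scan for every run) by one linear pass that maintains a running set of the current run's monomers and closes a run on the first repeat.
import Mathlib
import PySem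

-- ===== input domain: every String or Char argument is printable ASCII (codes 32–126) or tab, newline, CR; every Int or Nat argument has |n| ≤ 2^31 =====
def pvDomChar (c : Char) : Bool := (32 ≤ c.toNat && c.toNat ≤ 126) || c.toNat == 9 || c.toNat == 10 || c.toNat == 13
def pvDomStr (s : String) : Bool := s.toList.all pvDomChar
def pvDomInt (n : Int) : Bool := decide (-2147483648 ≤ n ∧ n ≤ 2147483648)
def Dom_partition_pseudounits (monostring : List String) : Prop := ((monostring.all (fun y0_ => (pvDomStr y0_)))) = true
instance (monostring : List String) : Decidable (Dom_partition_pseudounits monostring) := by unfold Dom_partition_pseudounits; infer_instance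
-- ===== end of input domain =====

-- B replaces A's nested while loops (a fresh Counter scan per run) by one linear pass with a
-- running set of the current run's monomers; the return values agree on all inputs (A is total).

-- ===== PORT A =====
-- inner 'while i+j < len(monostring)' loop of A: bumps the Counter, breaks on a repeat, yields j
-- (fuel only makes the recursion structural; ms.length fuel always suffices, see pvInnerA_eq_pvD)
def pvInnerA (ms : List String) (i : Nat) (j : Nat) (cnt : PySem.Dict String Int)
    (fuel : Nat) : Nat :=
  match fuel with
  | 0 => j
  | fuel + 1 =>
      if h : i + j < ms.length then
        let monomer := ms[i + j]
        let cnt' := cnt.modify monomer 0 (· + 1)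
        if cnt'.getD monomer 0 > 1 then j
        else pvInnerA ms i (j + 1) cnt' fuel
      else j

-- outer 'while i < len(monostring)' loop of A (fuel = ms.length iterations always suffice,
-- since every segment consumes at least one element)
def pvOuterA (ms : List String) (i : Nat) (fuel : Nat) : List (Int × Int) :=
  match fuel with
  | 0 => []
  | fuel + 1 =>
      if i < ms.length then
        ((i : Int), (i : Int) + (pvInnerA ms i 0 PySem.Dict.empty ms.length : Int) - 1)
          :: pvOuterA ms (i + pvInnerA ms i 0 PySem.Dict.empty ms.length) fuel
      else []

def partition_pseudounits (monostring : List String) : List (Int × Int) :=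
  pvOuterA monostring 0 monostring.length

-- ===== PORT B =====
-- B's 'for i in range(1, len(monostring))' loop: walks the tail carrying (start, seen, result)
def pvLoopB (rest : List String) (i : Nat) (start : Nat) (seen : PySem.Set String)
    (res : List (Int × Int)) : List (Int × Int) × Nat :=
  match rest with
  | [] => (res, start)
  | m :: r =>
      if seen.contains m then
        pvLoopB r (i + 1) i (PySem.Set.ofList [m]) (res ++ [((start : Int), (i : Int) - 1)])
      else
        pvLoopB r (i + 1) start (seen.add m) res

def partition_pseudounits_alt (monostring : List String) : List (Int × Int) :=
  match monostring with
  | [] => []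
  | m0 :: rest =>
      let p := pvLoopB rest 1 0 (PySem.Set.ofList [m0]) []
      p.1 ++ [((p.2 : Int), (monostring.length : Int) - 1)]

-- ===== PRECONDITION & SPEC =====
def Spec_partition_pseudounits (monostring : List String) (out : List (Int × Int)) : Prop := out = partition_pseudounits_alt monostring
instance (monostring : List String) (out : List (Int × Int)) : Decidable (Spec_partition_pseudounits monostring out) := by unfold Spec_partition_pseudounits; infer_instance

-- ===== CLAIM (what is proved, stated in full; the proofs are below) =====
def Claim_equal_partition_pseudounits : Prop := ∀ (monostring : List String), Dom_partition_pseudounits monostring → Spec_partition_pseudounits monostring (partition_pseudounits monostring)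

-- ===== LEMMAS AND PROOFS =====

-- common reference computation: walk the tail with (start, seen), emitting segments in order
def pvT (rest : List String) (i start : Nat) (seen : PySem.Set String) : List (Int × Int) :=
  match rest with
  | [] => [((start : Int), (i : Int) - 1)]
  | m :: r =>
      if seen.contains m then
        ((start : Int), (i : Int) - 1) :: pvT r (i + 1) i (PySem.Set.ofList [m])
      else
        pvT r (i + 1) start (seen.add m)

-- length of the maximal prefix of rest whose elements (together with seen) stay distinct
def pvD (seen : PySem.Set String) (rest : List String) : Nat :=
  match rest with
  | [] => 0
  | m :: r => if seen.contains m then 0 else 1 + pvD (seen.add m) r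

theorem pvD_le (seen : PySem.Set String) (rest : List String) : pvD seen rest ≤ rest.length := by
  induction rest generalizing seen with
  | nil => simp [pvD]
  | cons m r ih =>
      simp only [pvD, List.length_cons]
      split
      · omega
      · have := ih (seen.add m); omega

theorem pvLoopB_spec (rest : List String) (i start : Nat) (seen : PySem.Set String)
    (res : List (Int × Int)) :
    (pvLoopB rest i start seen res).1
      ++ [(((pvLoopB rest i start seen res).2 : Int), (i : Int) + rest.length - 1)]
      = res ++ pvT rest i start seen := by
  induction rest generalizing i start seen res with
  | nil => simp [pvLoopB, pvT]
  | cons m r ih =>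
      have hcast : (i : Int) + ((r.length + 1 : Nat) : Int) - 1
          = ((i + 1 : Nat) : Int) + (r.length : Int) - 1 := by push_cast; ring
      simp only [pvLoopB, pvT, List.length_cons]
      split
      · rw [hcast, ih]; simp
      · rw [hcast, ih]

-- the Counter of A seen through the invariant 'count positive ↔ member of seen'
theorem pvInnerA_ge (fuel : Nat) : ∀ (ms : List String) (i j : Nat) (cnt : PySem.Dict String Int),
    j ≤ pvInnerA ms i j cnt fuel := by
  induction fuel with
  | zero => intro ms i j cnt; simp [pvInnerA]
  | succ fuel ih =>
      intro ms i j cnt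
      simp only [pvInnerA]
      split
      · split
        · omega
        · have := ih ms i (j + 1) (cnt.modify ms[i + j] 0 (· + 1)); omega
      · omega

theorem pvInnerA_pos (ms : List String) (i : Nat) (fuel : Nat) (h : i < ms.length)
    (hf : 0 < fuel) : 1 ≤ pvInnerA ms i 0 PySem.Dict.empty fuel := by
  match fuel, hf with
  | fuel + 1, _ =>
    simp only [pvInnerA, Nat.add_zero, dif_pos h]
    rw [if_neg (by simp [PySem.Dict.getD_modify_self, PySem.Dict.getD_empty])]
    exact pvInnerA_ge fuel ms i 1 _

theorem pvInnerA_eq_pvD (fuel : Nat) : ∀ (ms : List String) (i j : Nat)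
    (cnt : PySem.Dict String Int) (seen : PySem.Set String),
    (∀ m, (0 < cnt.getD m 0 ↔ seen.contains m = true) ∧ 0 ≤ cnt.getD m 0) →
    ms.length ≤ i + j + fuel →
    pvInnerA ms i j cnt fuel = j + pvD seen (ms.drop (i + j)) := by
  induction fuel with
  | zero =>
      intro ms i j cnt seen hinv hfuel
      have hd : ms.drop (i + j) = [] := List.drop_eq_nil_of_le (by omega)
      simp [pvInnerA, hd, pvD]
  | succ fuel ih =>
      intro ms i j cnt seen hinv hfuel
      by_cases h : i + j < ms.length
      · have hd : ms.drop (i + j) = ms[i + j] :: ms.drop (i + j + 1) :=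
          List.drop_eq_getElem_cons h
        have h1 : (cnt.modify ms[i+j] 0 (· + 1)).getD ms[i+j] 0 = cnt.getD ms[i+j] 0 + 1 :=
          PySem.Dict.getD_modify_self ..
        simp only [pvInnerA, dif_pos h]
        by_cases hbrk : cnt.getD ms[i+j] 0 + 1 > 1
        · have hmem : seen.contains ms[i + j] = true := (hinv ms[i+j]).1.mp (by omega)
          rw [if_pos (by rw [h1]; exact hbrk), hd]
          simp only [pvD]
          rw [if_pos hmem]
          omega
        · have hnmem : seen.contains ms[i + j] = false := by
            rcases hinv ms[i+j] with ⟨hiff, hnn⟩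
            cases hc : seen.contains ms[i+j] with
            | false => rfl
            | true => exact absurd (by have := hiff.mpr hc; omega) hbrk
          have hinv' : ∀ m, (0 < (cnt.modify ms[i+j] 0 (· + 1)).getD m 0
                ↔ (seen.add ms[i+j]).contains m = true)
                ∧ 0 ≤ (cnt.modify ms[i+j] 0 (· + 1)).getD m 0 := by
            intro m
            rcases hinv m with ⟨hiff, hnn⟩
            by_cases hm : m = ms[i + j]
            · have h2 : (cnt.modify ms[i+j] 0 (· + 1)).getD m 0 = cnt.getD ms[i+j] 0 + 1 := by
                rw [hm]; exact PySem.Dict.getD_modify_self ..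
              rw [h2]
              have hnn2 := (hinv ms[i+j]).2
              refine ⟨iff_of_true (by omega) ?_, by omega⟩
              rw [hm]
              simp [pysem, PySem.Set.mem_add]
            · rw [PySem.Dict.getD_modify_of_ne cnt 0 _ hm]
              exact ⟨hiff.trans (by simp [pysem, PySem.Set.mem_add, hm]), hnn⟩
          rw [if_neg (by rw [h1]; exact hbrk)]
          rw [ih ms i (j + 1) _ _ hinv' (by omega), hd]
          simp only [pvD, hnmem, Bool.false_eq_true, if_false]
          have : i + (j + 1) = i + j + 1 := by omega
          rw [this]
          omega
      · have hd : ms.drop (i + j) = [] := List.drop_eq_nil_of_le (by omega)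
        simp [pvInnerA, h, hd, pvD]

-- unfold one whole segment of pvT
theorem pvT_segment (rest : List String) (i start : Nat) (seen : PySem.Set String) :
    pvT rest i start seen
      = ((start : Int), (i : Int) + (pvD seen rest : Int) - 1)
        :: (if pvD seen rest = rest.length then []
            else pvT (rest.drop (pvD seen rest)) (i + pvD seen rest) (i + pvD seen rest) PySem.Set.empty) := by
  induction rest generalizing i seen with
  | nil => simp [pvT, pvD]
  | cons m r ih =>
      by_cases hc : seen.contains m = true
      · simp only [pvT, pvD, hc, if_pos, List.length_cons]
        rw [if_neg (by omega : ¬ (0 : Nat) = r.length + 1)]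
        simp only [List.drop_zero, Nat.add_zero, Nat.cast_zero]
        have hstep : pvT (m :: r) i i PySem.Set.empty = pvT r (i + 1) i (PySem.Set.ofList [m]) := by
          rw [pvT]
          rw [if_neg (by simp [pysem])]
          rfl
        rw [hstep]
        norm_num
      · simp only [pvT, pvD, hc, Bool.false_eq_true, if_false, List.length_cons]
        rw [ih (i + 1) (seen.add m)]
        have hcast : ((i + 1 : Nat) : Int) + ((pvD (seen.add m) r : Nat) : Int) - 1
            = (i : Int) + ((1 + pvD (seen.add m) r : Nat) : Int) - 1 := by push_cast; ring
        by_cases hl : pvD (seen.add m) r = r.length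
        · rw [if_pos hl, if_pos (by omega), hcast]
        · rw [if_neg hl, if_neg (by omega), hcast]
          have hdrop : (m :: r).drop (1 + pvD (seen.add m) r) = r.drop (pvD (seen.add m) r) := by
            rw [Nat.add_comm]
            simp [List.drop_succ_cons]
          rw [hdrop]
          have hidx : i + 1 + pvD (seen.add m) r = i + (1 + pvD (seen.add m) r) := by omega
          rw [hidx]

theorem pvEmptyInv : ∀ m : String,
    (0 < (PySem.Dict.empty : PySem.Dict String Int).getD m 0
      ↔ (PySem.Set.empty : PySem.Set String).contains m = true)
    ∧ 0 ≤ (PySem.Dict.empty : PySem.Dict String Int).getD m 0 := by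
  intro m
  simp [pysem]

theorem pvOuterA_nil (ms : List String) (i fuel : Nat) (h : ¬ i < ms.length) :
    pvOuterA ms i fuel = [] := by
  cases fuel <;> simp [pvOuterA, h]

theorem pvOuterA_eq_pvT (ms : List String) :
    ∀ fuel i, ms.length - i ≤ fuel → i < ms.length →
      pvOuterA ms i fuel = pvT (ms.drop i) i i PySem.Set.empty := by
  intro fuel
  induction fuel with
  | zero => intro i h1 h2; omega
  | succ fuel ih =>
      intro i h1 h2
      have hj : pvInnerA ms i 0 PySem.Dict.empty ms.length = pvD PySem.Set.empty (ms.drop i) := by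
        have := pvInnerA_eq_pvD ms.length ms i 0 PySem.Dict.empty PySem.Set.empty pvEmptyInv
          (by omega)
        simpa using this
      have hjpos := pvInnerA_pos ms i ms.length h2 (by omega)
      simp only [pvOuterA, if_pos h2]
      rw [pvT_segment, hj]
      congr 1
      by_cases hfull : pvD PySem.Set.empty (ms.drop i) = (ms.drop i).length
      · rw [if_pos hfull]
        have hlen : (ms.drop i).length = ms.length - i := List.length_drop ..
        exact pvOuterA_nil ms _ fuel (by omega)
      · rw [if_neg hfull]
        have hle := pvD_le PySem.Set.empty (ms.drop i)
        have hlen : (ms.drop i).length = ms.length - i := List.length_drop ..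
        have hlt : i + pvD PySem.Set.empty (ms.drop i) < ms.length := by omega
        rw [ih (i + pvD PySem.Set.empty (ms.drop i)) (by omega) hlt]
        rw [List.drop_drop]

-- ===== VERDICT (by name: the statement is the Claim_ definition above) =====
theorem partition_pseudounits_spec : Claim_equal_partition_pseudounits := by
  intro ms _
  unfold Spec_partition_pseudounits partition_pseudounits partition_pseudounits_alt
  match ms with
  | [] => simp [pvOuterA]
  | m0 :: rest =>
      have hlhs : pvOuterA (m0 :: rest) 0 (m0 :: rest).length
          = pvT rest 1 0 (PySem.Set.ofList [m0]) := by
        rw [pvOuterA_eq_pvT (m0 :: rest) ((m0 :: rest).length) 0 (by omega) (by simp)]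
        simp only [List.drop_zero]
        rw [pvT]
        rw [if_neg (by simp [pysem])]
        rfl
      have hrhs := pvLoopB_spec rest 1 0 (PySem.Set.ofList [m0]) []
      simp only [List.nil_append] at hrhs
      have hcast : ((1 : Nat) : Int) + (rest.length : Int) - 1
          = (((m0 :: rest).length : Nat) : Int) - 1 := by push_cast [List.length_cons]; omega
      rw [hlhs, ← hrhs, hcast]
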